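-- pv_equiv track=rewrite | github.com/n4hy/PassiveRadar_Kraken | fix_grc_layout.py | parse_yaml_blocks
-- ===== SOURCE A (Python) =====
-- def parse_yaml_blocks(lines):
--     blocks = []
--     current_block = []
--     in_block = False
--
--     for line in lines:
--         stripped = line.strip()
--         if stripped.startswith('- name:'):
--             if current_block:
--                 blocks.append(current_block)
--             current_block = [line]
--             in_block = True
--         elif in_block:
--             if stripped.startswith('connections:') or stripped.startswith('metadata:'):
--                 in_block = False
--                 blocks.append(current_block)
--                 current_block = []
--             else:
--                 current_block.append(line)
--         else:
--             pass
--
--     if current_block: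
--         blocks.append(current_block)
--     return blocks
-- ===== SOURCE B (Python) =====
-- def parse_yaml_blocks(lines):
--     def is_name(l):
--         return l.strip().startswith('- name:')
--
--     def is_stop(l):
--         s = l.strip()
--         return (s.startswith('- name:') or s.startswith('connections:')
--                 or s.startswith('metadata:'))
--
--     blocks = []
--     i = 0
--     n = len(lines)
--     while True:
--         # skip to the next block header
--         while i < n and not is_name(lines[i]):
--             i += 1
--         if i == n:
--             return blocks
--         # collect the header and its body up to the next header/terminator
--         block = [lines[i]]
--         i += 1
--         while i < n and not is_stop(lines[i]):
--             block.append(lines[i])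
--             i += 1
--         blocks.append(block)
-- ===== Notes on version B (the rewrite author's own statement) =====
-- stated objective: alternative
-- what changed: A's single pass with a blocks/current_block/in_block state machine is replaced by a skip-then-span decomposition: an outer loop that skips to the next '- name:' header and an inner span that collects the body up to the next header or terminator, emitting each complete block at once.
import Mathlib
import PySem

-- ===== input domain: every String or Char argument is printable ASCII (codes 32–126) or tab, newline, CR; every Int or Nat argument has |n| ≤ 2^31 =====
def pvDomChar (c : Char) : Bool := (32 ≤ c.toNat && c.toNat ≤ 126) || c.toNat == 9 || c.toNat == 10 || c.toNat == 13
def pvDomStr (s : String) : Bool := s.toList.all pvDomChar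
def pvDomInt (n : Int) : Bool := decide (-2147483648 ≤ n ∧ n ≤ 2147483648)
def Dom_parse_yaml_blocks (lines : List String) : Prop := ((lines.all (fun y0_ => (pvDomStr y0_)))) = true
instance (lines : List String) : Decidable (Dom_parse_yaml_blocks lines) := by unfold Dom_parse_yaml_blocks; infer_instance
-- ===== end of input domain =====

-- B replaces A's in_block flag machine by a skip-then-span decomposition (alternative, same cost).

-- ===== PORT A =====
-- one step of A's for-loop: state = (blocks, current_block, in_block)
def pvAStep (st : List (List String) × List String × Bool) (line : String) :
    List (List String) × List String × Bool :=
  if PySem.Str.startswith (PySem.Str.strip line) "- name:" then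
    ((if st.2.1 ≠ [] then st.1 ++ [st.2.1] else st.1), [line], true)
  else if st.2.2 then
    (if PySem.Str.startswith (PySem.Str.strip line) "connections:" ||
        PySem.Str.startswith (PySem.Str.strip line) "metadata:" then
      (st.1 ++ [st.2.1], [], false)
    else
      (st.1, st.2.1 ++ [line], true))
  else
    st

def parse_yaml_blocks (lines : List String) : List (List String) :=
  let st := lines.foldl pvAStep ([], [], false)
  if st.2.1 ≠ [] then st.1 ++ [st.2.1] else st.1

-- ===== PORT B =====
def pvIsName (l : String) : Bool := PySem.Str.startswith (PySem.Str.strip l) "- name:"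

def pvIsStop (l : String) : Bool :=
  PySem.Str.startswith (PySem.Str.strip l) "- name:" ||
    PySem.Str.startswith (PySem.Str.strip l) "connections:" ||
    PySem.Str.startswith (PySem.Str.strip l) "metadata:"

-- outer while-loop of B: skip to the next header, span the header's block, recurse on the rest
def pvBLoop (blocks : List (List String)) (rest : List String) : List (List String) :=
  match h : rest.dropWhile (fun l => !pvIsName l) with
  | [] => blocks
  | l :: t =>
      pvBLoop (blocks ++ [l :: t.takeWhile (fun x => !pvIsStop x)])
        (t.dropWhile (fun x => !pvIsStop x))
termination_by rest.length
decreasing_by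
  have h1 : (rest.dropWhile (fun l => !pvIsName l)).length ≤ rest.length :=
    List.length_dropWhile_le _ _
  rw [h] at h1
  have h2 : (t.dropWhile (fun x => !pvIsStop x)).length ≤ t.length :=
    List.length_dropWhile_le _ _
  simp at h1
  omega

def parse_yaml_blocks_alt (lines : List String) : List (List String) :=
  pvBLoop [] lines

-- ===== PRECONDITION & SPEC =====
def Spec_parse_yaml_blocks (lines : List String) (out : List (List String)) : Prop := out = parse_yaml_blocks_alt lines
instance (lines : List String) (out : List (List String)) : Decidable (Spec_parse_yaml_blocks lines out) := by unfold Spec_parse_yaml_blocks; infer_instance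

-- ===== CLAIM =====
def Claim_equal_parse_yaml_blocks : Prop := ∀ (lines : List String), Dom_parse_yaml_blocks lines → Spec_parse_yaml_blocks lines (parse_yaml_blocks lines)

-- ===== LEMMAS AND PROOFS =====

-- finishing step of A
def pvAFinish (st : List (List String) × List String × Bool) : List (List String) :=
  if st.2.1 ≠ [] then st.1 ++ [st.2.1] else st.1

-- non-dependent unfolding of pvBLoop
theorem pvBLoop_eq (b : List (List String)) (rest : List String) :
    pvBLoop b rest =
      match rest.dropWhile (fun l => !pvIsName l) with
      | [] => b
      | l :: t =>
          pvBLoop (b ++ [l :: t.takeWhile (fun x => !pvIsStop x)])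
            (t.dropWhile (fun x => !pvIsStop x)) := by
  rw [pvBLoop]
  split <;> rename_i h <;> simp only [h]

theorem pvBLoop_skip (b : List (List String)) (x : String) (t : List String)
    (hx : pvIsName x = false) : pvBLoop b (x :: t) = pvBLoop b t := by
  rw [pvBLoop_eq b (x :: t), pvBLoop_eq b t]
  simp only [List.dropWhile_cons, hx, Bool.not_false, if_pos]

theorem pvBLoop_name (b : List (List String)) (x : String) (t : List String)
    (hx : pvIsName x = true) :
    pvBLoop b (x :: t) =
      pvBLoop (b ++ [x :: t.takeWhile (fun y => !pvIsStop y)])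
        (t.dropWhile (fun y => !pvIsStop y)) := by
  rw [pvBLoop_eq b (x :: t)]
  simp only [List.dropWhile_cons, hx, Bool.not_true, Bool.false_eq_true, if_false]

-- main invariant: A's fold from either reachable state computes B's loop
theorem pvMain (rest : List String) :
    (∀ b, pvAFinish (rest.foldl pvAStep (b, [], false)) = pvBLoop b rest) ∧
    (∀ b cur, cur ≠ [] →
      pvAFinish (rest.foldl pvAStep (b, cur, true)) =
        pvBLoop (b ++ [cur ++ rest.takeWhile (fun y => !pvIsStop y)])
          (rest.dropWhile (fun y => !pvIsStop y))) := by
  induction rest with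
  | nil =>
      constructor
      · intro b
        rw [pvBLoop_eq]
        simp [pvAFinish]
      · intro b cur hc
        rw [pvBLoop_eq]
        simp [pvAFinish, hc]
  | cons x t ih =>
      obtain ⟨ih1, ih2⟩ := ih
      constructor
      · intro b
        by_cases hn : pvIsName x = true
        · -- header found: open the block [x]
          have hstep : pvAStep (b, [], false) x = (b, [x], true) := by
            unfold pvAStep pvIsName at *
            rw [if_pos hn]
            simp
          rw [List.foldl_cons, hstep, ih2 b [x] (by simp), pvBLoop_name b x t hn]
          simp
        · -- not a header, not in a block: A skips the line, B's dropWhile skips it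
          have hn' : pvIsName x = false := by simpa using hn
          have hstep : pvAStep (b, [], false) x = (b, [], false) := by
            unfold pvAStep pvIsName at *
            rw [if_neg (by simp only [hn', Bool.false_eq_true, not_false_eq_true])]
            simp
          rw [List.foldl_cons, hstep, ih1 b, pvBLoop_skip b x t hn']
      · intro b cur hc
        by_cases hn : pvIsName x = true
        · -- header inside a block: close cur, open [x]
          have hs : pvIsStop x = true := by
            unfold pvIsStop pvIsName at *
            rw [hn]
            simp only [Bool.true_or]
          have hstep : pvAStep (b, cur, true) x = (b ++ [cur], [x], true) := by
            unfold pvAStep pvIsName at *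
            rw [if_pos hn]
            simp [hc]
          rw [List.foldl_cons, hstep, ih2 (b ++ [cur]) [x] (by simp),
            List.takeWhile_cons, List.dropWhile_cons]
          simp only [hs, Bool.not_true, Bool.false_eq_true, if_false]
          rw [pvBLoop_name (b ++ [cur ++ []]) x t hn]
          simp
        · have hn' : pvIsName x = false := by simpa using hn
          by_cases ht : (PySem.Str.startswith (PySem.Str.strip x) "connections:" ||
              PySem.Str.startswith (PySem.Str.strip x) "metadata:") = true
          · -- terminator: close cur, leave block mode
            have hs : pvIsStop x = true := by
              unfold pvIsStop pvIsName at *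
              rcases Bool.or_eq_true _ _ |>.mp ht with h | h <;>
                rw [h] <;> simp only [Bool.or_true, Bool.true_or]
            have hstep : pvAStep (b, cur, true) x = (b ++ [cur], [], false) := by
              unfold pvAStep pvIsName at *
              rw [if_neg (by rw [hn']; exact Bool.false_ne_true), if_pos rfl, if_pos ht]
            rw [List.foldl_cons, hstep, ih1 (b ++ [cur]),
              List.takeWhile_cons, List.dropWhile_cons]
            simp only [hs, Bool.not_true, Bool.false_eq_true, if_false]
            rw [pvBLoop_skip (b ++ [cur ++ []]) x t hn']
            simp
          · -- ordinary body line: append it to cur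
            have ht' := ht
            rw [Bool.or_eq_true, not_or, Bool.not_eq_true, Bool.not_eq_true] at ht'
            have hs : pvIsStop x = false := by
              unfold pvIsStop pvIsName at *
              rw [hn', ht'.1, ht'.2]
              simp only [Bool.false_or]
            have hstep : pvAStep (b, cur, true) x = (b, cur ++ [x], true) := by
              unfold pvAStep pvIsName at *
              rw [if_neg (by rw [hn']; exact Bool.false_ne_true), if_pos rfl, if_neg ht]
            rw [List.foldl_cons, hstep, ih2 b (cur ++ [x]) (by simp),
              List.takeWhile_cons, List.dropWhile_cons]
            simp [hs]

-- ===== VERDICT =====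
theorem parse_yaml_blocks_spec : Claim_equal_parse_yaml_blocks := by
  intro lines _
  unfold Spec_parse_yaml_blocks parse_yaml_blocks parse_yaml_blocks_alt
  exact (pvMain lines).1 []
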